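-- pv_equiv track=rewrite | github.com/team-re-verb/RE-VERB | server/speech_diarization/diarization.py | get_timestamps
-- ===== SOURCE A (Python) =====
-- from collections import Counter
--
-- def get_timestamps(vad_ts, diar_res, diar_frame=25, diar_stride=10):
--     '''
--     Gets the timestamps from the results of the clusterer
--
--     :param vad_ts: the time-stamps of when the speakers had spoken in the conversation
--     :type vad_ts: list (of tuples which contains the pairs of timestamps)
--
--     :param diar_res: the results of the full diarization process
--     :type diar_res: list (of speaker numbers)
--
--     :param diar_frame: the length of each utterance
--     :type diar_frame: int
--
--     :param diar_stride: the not-overlapping part of each utterance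
--     :type diar_stride: int
--
--     :returns:
--         the timestamps of each speaker in the conversation
--         :type: dict
--     '''
--
--     occurences = { x:[] for x in Counter(diar_res).keys() }
--     count = 0
--
--     for times in vad_ts:
--         for ts in range(times[0], times[1], diar_stride):
--             occurences[diar_res[count]].append(ts)
--             count += 1
--             #del diar_res[0]
--             #Not 100% accurate because we need to consider the last ebedding of a speaker and appent the diar_frame to it
--
--
--     for speaker, timestamps in occurences.items():
--         for i in range(len(timestamps) - 1):
--             if i + 1 < len((timestamps)):
--                 if timestamps[i + 1] - timestamps[i] == diar_stride:
--                     del timestamps[i + 1]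
--                     #Removing unessecary timestemps
--
--         occurences[speaker] = list(zip(timestamps[0::2], timestamps[1::2])) #Ordering each pair of timestamps in tuples
--
--     return occurences
-- ===== SOURCE B (Python) =====
-- def _collapse(ts, stride):
--     # one greedy left-to-right pass: keep ts[j]; if the next timestamp is exactly
--     # one stride away it is redundant, skip it and continue after it.
--     kept = []
--     j = 0
--     n = len(ts)
--     while j < n:
--         kept.append(ts[j])
--         if j + 1 < n and ts[j + 1] - ts[j] == stride:
--             j += 2
--         else:
--             j += 1
--     return kept
--
--
-- def _pair_up(ts):
--     out = []
--     j = 0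
--     while j + 1 < len(ts):
--         out.append((ts[j], ts[j + 1]))
--         j += 2
--     return out
--
--
-- def get_timestamps(vad_ts, diar_res, diar_frame=25, diar_stride=10):
--     starts = [t for a, b in vad_ts for t in range(a, b, diar_stride)]
--     bins = {spk: [] for spk in dict.fromkeys(diar_res)}
--     for spk, t in zip(diar_res, starts):
--         bins[spk].append(t)
--     return {spk: _pair_up(_collapse(ts, diar_stride)) for spk, ts in bins.items()}
-- ===== Notes on version B (the rewrite author's own statement) =====
-- stated objective: alternative
-- what changed: A deletes stride-spaced successors in place while rescanning each speaker's list and then pairs via two stride-2 slices, binning timestamps by indexing diar_res with a running counter; B bins by zipping diar_res with the flattened start list and collapses each speaker's list in one greedy left-to-right pass, pairing adjacent survivors directly.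
import Mathlib
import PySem

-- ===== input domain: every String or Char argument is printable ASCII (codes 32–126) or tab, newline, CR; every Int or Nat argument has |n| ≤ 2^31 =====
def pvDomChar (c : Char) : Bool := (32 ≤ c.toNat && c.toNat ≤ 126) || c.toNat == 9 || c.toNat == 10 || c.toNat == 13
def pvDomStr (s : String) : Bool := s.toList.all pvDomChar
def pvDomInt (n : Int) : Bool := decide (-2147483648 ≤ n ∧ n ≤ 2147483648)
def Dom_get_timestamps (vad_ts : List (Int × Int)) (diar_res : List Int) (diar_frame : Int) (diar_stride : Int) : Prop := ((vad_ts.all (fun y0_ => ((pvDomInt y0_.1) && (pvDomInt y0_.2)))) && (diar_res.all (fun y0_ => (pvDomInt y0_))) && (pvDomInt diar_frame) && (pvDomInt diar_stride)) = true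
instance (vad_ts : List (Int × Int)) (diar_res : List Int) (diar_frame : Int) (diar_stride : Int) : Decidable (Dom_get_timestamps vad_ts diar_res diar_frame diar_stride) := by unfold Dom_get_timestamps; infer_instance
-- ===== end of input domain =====

-- B replaces A's delete-in-place rescan of each speaker's timestamp list by one greedy
-- left-to-right pass that pairs as it goes, and bins timestamps by zipping diar_res with
-- the flattened start list instead of indexing it with a running counter (objective:
-- alternative).

-- ===== PORT A =====
-- one step of A's first loop body: occurences[diar_res[count]].append(ts); count += 1.
-- diar_res[count] out of range is IndexError in Python (excluded by Pre_); the key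
-- diar_res[count] is always present in the dict, so .append is Dict.modify with the
-- default never used.
def pvStepA (diar_res : List Int) (st : PySem.Dict Int (List Int) × Int) (ts : Int) :
    PySem.Dict Int (List Int) × Int :=
  match PySem.List.pyGet? diar_res st.2 with
  | some spk => (st.1.modify spk [] (fun l => l ++ [ts]), st.2 + 1)
  | none => (st.1, st.2 + 1)

-- body of A's del-loop: if i + 1 < len(timestamps): if timestamps[i+1] - timestamps[i]
-- == diar_stride: del timestamps[i+1]  (indices are in range under the guard, so getD /
-- eraseIdx are exact)
def pvDelStep (stride : Int) (cur : List Int) (i : Nat) : List Int :=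
  if i + 1 < cur.length then
    if cur.getD (i + 1) 0 - cur.getD i 0 = stride then cur.eraseIdx (i + 1) else cur
  else cur

-- for i in range(len(timestamps) - 1): …  (the list shrinks while i advances)
def pvDelLoop (stride : Int) (ts : List Int) : List Int :=
  (List.range (ts.length - 1)).foldl (pvDelStep stride) ts

def get_timestamps (vad_ts : List (Int × Int)) (diar_res : List Int) (diar_frame : Int) (diar_stride : Int) : List (Int × List (Int × Int)) :=
  -- occurences = { x:[] for x in Counter(diar_res).keys() }
  let occ0 : PySem.Dict Int (List Int) :=
    (PySem.Dict.counter diar_res).keys.foldl (fun d x => d.insert x []) PySem.Dict.empty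
  -- count = 0; for times in vad_ts: for ts in range(times[0], times[1], diar_stride): …
  let st := vad_ts.foldl
    (fun st times => (PySem.List.pyRange times.1 times.2 diar_stride).foldl (pvStepA diar_res) st)
    (occ0, (0 : Int))
  -- second loop: each occurences[speaker] is reassigned (same keys, same order); the
  -- values change type, so the resulting dict is returned directly as its items list
  st.1.items.map (fun p =>
    let ts2 := pvDelLoop diar_stride p.2
    (p.1, List.zip ((PySem.List.slice? ts2 (some 0) none 2).getD [])
                   ((PySem.List.slice? ts2 (some 1) none 2).getD [])))

-- ===== PORT B =====
-- _collapse: while j < n: kept.append(ts[j]); skip the next element when it is exactly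
-- one stride away (j += 2) else j += 1 — structural recursion on the suffix at j
def pvCollapse (stride : Int) : List Int → List Int
  | [] => []
  | [x] => [x]
  | x :: y :: r => if y - x = stride then x :: pvCollapse stride r else x :: pvCollapse stride (y :: r)

-- _pair_up: while j + 1 < len(ts): out.append((ts[j], ts[j+1])); j += 2
def pvPairUp : List Int → List (Int × Int)
  | [] => []
  | [_] => []
  | a :: b :: r => (a, b) :: pvPairUp r

def get_timestamps_alt (vad_ts : List (Int × Int)) (diar_res : List Int) (diar_frame : Int) (diar_stride : Int) : List (Int × List (Int × Int)) :=
  -- starts = [t for a, b in vad_ts for t in range(a, b, diar_stride)]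
  let starts := vad_ts.flatMap (fun p => PySem.List.pyRange p.1 p.2 diar_stride)
  -- bins = {spk: [] for spk in dict.fromkeys(diar_res)}
  let bins0 : PySem.Dict Int (List Int) :=
    (PySem.List.dedup diar_res).foldl (fun d spk => d.insert spk []) PySem.Dict.empty
  -- for spk, t in zip(diar_res, starts): bins[spk].append(t)  (the key is always
  -- present, so .append is Dict.modify with the default never used)
  let bins := (List.zip diar_res starts).foldl
    (fun d p => d.modify p.1 [] (fun l => l ++ [p.2])) bins0
  -- the final dict comprehension runs over bins.items() (distinct keys, insertion
  -- order) and is returned as its items list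
  bins.items.map (fun p => (p.1, pvPairUp (pvCollapse diar_stride p.2)))

-- ===== PRECONDITION & SPEC =====
-- number of elements of range(a, b, st) (len(range(a, b, st)) in closed form)
def pvRangeLen (a b st : Int) : Nat :=
  if st = 0 then 0
  else if 0 < st then (if a < b then ((b - a + st - 1) / st).toNat else 0)
  else if b < a then ((a - b + -st - 1) / -st).toNat else 0

-- Pre_ excludes exactly the inputs where A raises: diar_stride = 0 with a nonempty
-- vad_ts (range() ValueError), and inputs generating more timestamps than diar_res has
-- entries (diar_res[count] IndexError).
def Pre_get_timestamps (vad_ts : List (Int × Int)) (diar_res : List Int) (diar_frame : Int) (diar_stride : Int) : Prop :=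
  (diar_stride ≠ 0 ∨ vad_ts = []) ∧
  (vad_ts.map (fun p => pvRangeLen p.1 p.2 diar_stride)).sum ≤ diar_res.length
instance (vad_ts : List (Int × Int)) (diar_res : List Int) (diar_frame : Int) (diar_stride : Int) : Decidable (Pre_get_timestamps vad_ts diar_res diar_frame diar_stride) := by unfold Pre_get_timestamps; infer_instance

def pvWitness_get_timestamps : (List (Int × Int)) × List Int × Int × Int := ([(0, 20)], [1, 0, 1], 25, 10)

def Spec_get_timestamps (vad_ts : List (Int × Int)) (diar_res : List Int) (diar_frame : Int) (diar_stride : Int) (out : List (Int × List (Int × Int))) : Prop := out = get_timestamps_alt vad_ts diar_res diar_frame diar_stride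
instance (vad_ts : List (Int × Int)) (diar_res : List Int) (diar_frame : Int) (diar_stride : Int) (out : List (Int × List (Int × Int))) : Decidable (Spec_get_timestamps vad_ts diar_res diar_frame diar_stride out) := by unfold Spec_get_timestamps; infer_instance

-- ===== CLAIM (what is proved, stated in full; the proofs are below) =====
def Claim_equal_get_timestamps : Prop := ∀ (vad_ts : List (Int × Int)) (diar_res : List Int) (diar_frame : Int) (diar_stride : Int), Dom_get_timestamps vad_ts diar_res diar_frame diar_stride → Pre_get_timestamps vad_ts diar_res diar_frame diar_stride → Spec_get_timestamps vad_ts diar_res diar_frame diar_stride (get_timestamps vad_ts diar_res diar_frame diar_stride)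

-- ===== LEMMAS AND PROOFS =====

-- A's first loop, flattened over the generated starts, counts exactly through diar_res:
-- it is the grouped fold over zip diar_res starts.
theorem pvStepA_zip (dr : List Int) : ∀ (ts : List Int) (c : Nat) (d : PySem.Dict Int (List Int)),
    c + ts.length ≤ dr.length →
    ts.foldl (pvStepA dr) (d, (c : Int)) =
      ((List.zip (dr.drop c) ts).foldl (fun d p => d.modify p.1 [] (fun x => x ++ [p.2])) d,
       ((c : Int) + ts.length)) := by
  intro ts
  induction ts with
  | nil => intro c d _; simp
  | cons t ts ih =>
    intro c d hle
    have hc : c < dr.length := by simp at hle; omega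
    have h1 : pvStepA dr (d, (c : Int)) t = (d.modify dr[c] [] (fun l => l ++ [t]), ((c + 1 : Nat) : Int)) := by
      simp [pvStepA, PySem.List.pyGet?_natCast, List.getElem?_eq_getElem hc]
    rw [List.foldl_cons, h1, ih (c + 1) _ (by simp at hle ⊢; omega)]
    conv_rhs => rw [List.drop_eq_getElem_cons hc, List.zip_cons_cons, List.foldl_cons]
    refine Prod.ext rfl ?_
    simp; push_cast; ring

-- trailing iterations of A's del-loop past the end of the shrunken list do nothing
theorem pvDelStep_noop (s : Int) : ∀ (k i : Nat) (cur : List Int), cur.length ≤ i + 1 →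
    (List.range' i k).foldl (pvDelStep s) cur = cur := by
  intro k
  induction k with
  | zero => intro i cur _; simp
  | succ k ih =>
    intro i cur h
    rw [List.range'_succ, List.foldl_cons]
    have hstep : pvDelStep s cur i = cur := by
      unfold pvDelStep; rw [if_neg (by omega)]
    rw [hstep]; exact ih (i + 1) cur (by omega)

-- the del-loop invariant: with a finalized prefix F in place, the remaining iterations
-- turn the suffix R into its greedy collapse
theorem pvDelLoop_inv (s : Int) : ∀ (k : Nat) (F R : List Int), R.length ≤ k + 1 →
    (List.range' F.length k).foldl (pvDelStep s) (F ++ R) = F ++ pvCollapse s R := by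
  intro k
  induction k with
  | zero =>
    intro F R h
    match R with
    | [] => simp [pvCollapse]
    | [x] => simp [pvCollapse]
    | a :: b :: r => simp at h
  | succ k ih =>
    intro F R h
    match R with
    | [] =>
      rw [pvDelStep_noop s _ _ _ (by simp)]; rfl
    | [x] =>
      rw [pvDelStep_noop s _ _ _ (by simp)]; rfl
    | x :: y :: r =>
      rw [List.range'_succ, List.foldl_cons]
      have hx : (F ++ x :: y :: r).getD (F.length + 0) 0 = x := by
        simp [List.getD_eq_getElem?_getD, List.getElem?_append_right]
      have hy : (F ++ x :: y :: r).getD (F.length + 1) 0 = y := by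
        simp [List.getD_eq_getElem?_getD, List.getElem?_append_right]
      have hguard : F.length + 1 < (F ++ x :: y :: r).length := by
        simp only [List.length_append, List.length_cons]; omega
      by_cases hd : y - x = s
      · have hstep : pvDelStep s (F ++ x :: y :: r) F.length = (F ++ [x]) ++ r := by
          unfold pvDelStep
          rw [if_pos hguard]
          rw [show F.length + 1 = F.length + 1 from rfl]
          rw [Nat.add_zero] at hx
          rw [hx, hy, if_pos hd,
              List.eraseIdx_append_of_length_le (by omega) (x :: y :: r)]
          simp
        rw [hstep,
            show F.length + 1 = (F ++ [x]).length by simp,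
            ih (F ++ [x]) r (by simp at h ⊢; omega)]
        simp [pvCollapse, hd]
      · have hstep : pvDelStep s (F ++ x :: y :: r) F.length = (F ++ [x]) ++ (y :: r) := by
          unfold pvDelStep
          rw [if_pos hguard]
          rw [Nat.add_zero] at hx
          rw [hx, hy, if_neg hd]
          simp
        rw [hstep,
            show F.length + 1 = (F ++ [x]).length by simp,
            ih (F ++ [x]) (y :: r) (by simp at h ⊢; omega)]
        simp [pvCollapse, hd]

theorem pvDelLoop_eq_collapse (s : Int) (l : List Int) : pvDelLoop s l = pvCollapse s l := by
  have := pvDelLoop_inv s (l.length - 1) [] l (by omega)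
  simpa [pvDelLoop, List.range_eq_range'] using this

-- the even-position elements of a list (proof helper for the step-2 slices)
def pvEvens : List Int → List Int
  | [] => []
  | [x] => [x]
  | x :: _ :: r => x :: pvEvens r

theorem pvEvens_eq : ∀ l : List Int,
    (List.range ((l.length + 1) / 2)).filterMap (fun k => l[2 * k]?) = pvEvens l := by
  intro l
  induction l using pvEvens.induct with
  | case1 => simp [pvEvens]
  | case2 x => simp [pvEvens, List.range_succ]
  | case3 x y r ih =>
    have hlen : ((x :: y :: r).length + 1) / 2 = (r.length + 1) / 2 + 1 := by simp; omega
    rw [hlen, List.range_succ_eq_map, List.filterMap_cons, List.filterMap_map]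
    have hf : ((fun k => (x :: y :: r)[2 * k]?) ∘ Nat.succ) = fun k : Nat => r[2 * k]? := by
      funext k
      show (x :: y :: r)[2 * (k + 1)]? = r[2 * k]?
      rw [show 2 * (k + 1) = 2 * k + 1 + 1 by ring]
      simp
    simp only [hf, ih]
    simp [pvEvens]

theorem pvSlice0 (l : List Int) : PySem.List.slice? l (some 0) none 2 = some (pvEvens l) := by
  rw [← pvEvens_eq]
  simp only [PySem.List.slice?, PySem.List.sliceIndices]
  norm_num
  have hcount : (if 0 < l.length then (((l.length : Int) + 2 - 1) / 2).toNat else 0)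
      = (l.length + 1) / 2 := by split <;> omega
  have hidx : ∀ k : Nat, ((2 : Int) * (k : Int)).toNat = 2 * k := by intro k; omega
  rw [hcount]
  simp only [hidx]

theorem pvSlice1 (l : List Int) :
    PySem.List.slice? l (some 1) none 2 = some (pvEvens l.tail) := by
  match l with
  | [] => decide
  | x :: t =>
    rw [show (x :: t).tail = t from rfl, ← pvEvens_eq]
    simp only [PySem.List.slice?, PySem.List.sliceIndices]
    norm_num
    have hcount : (if 0 < t.length then (((t.length : Int) + 2 - 1) / 2).toNat else 0)
        = (t.length + 1) / 2 := by split <;> omega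
    have hidx : ∀ k : Nat, (x :: t)[((1 : Int) + 2 * (k : Int)).toNat]? = t[2 * k]? := by
      intro k
      rw [show ((1 : Int) + 2 * (k : Int)).toNat = 2 * k + 1 by omega]
      simp
    rw [hcount]
    simp only [hidx]

theorem pvEvens_cons (z : Int) (r : List Int) : pvEvens (z :: r) = z :: pvEvens r.tail := by
  cases r <;> rfl

theorem pvZip_evens : ∀ l : List Int, List.zip (pvEvens l) (pvEvens l.tail) = pvPairUp l := by
  intro l
  induction l using pvPairUp.induct with
  | case1 => rfl
  | case2 x => rfl
  | case3 a b r ih =>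
    show List.zip (a :: pvEvens r) (pvEvens (b :: r)) = (a, b) :: pvPairUp r
    rw [pvEvens_cons b r, List.zip_cons_cons, ih]
  
-- pair layer: A's zip of the two stride-2 slices equals B's _pair_up
theorem pvZipSlices (l : List Int) :
    List.zip ((PySem.List.slice? l (some 0) none 2).getD [])
             ((PySem.List.slice? l (some 1) none 2).getD []) = pvPairUp l := by
  rw [pvSlice0, pvSlice1]
  simpa using pvZip_evens l


-- ===== VERDICT (by name: the statement is the Claim_ definition above) =====
theorem pvLength_pyRange (a b st : Int) :
    (PySem.List.pyRange a b st).length = pvRangeLen a b st := by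
  unfold PySem.List.pyRange pvRangeLen
  split_ifs <;> simp

theorem get_timestamps_spec : Claim_equal_get_timestamps := by
  intro vad_ts diar_res diar_frame diar_stride _ hpre
  unfold Spec_get_timestamps
  have hlen : (vad_ts.flatMap (fun p => PySem.List.pyRange p.1 p.2 diar_stride)).length
      ≤ diar_res.length := by
    rw [List.length_flatMap]
    have : (vad_ts.map (fun p => (PySem.List.pyRange p.1 p.2 diar_stride).length)).sum
        = (vad_ts.map (fun p => pvRangeLen p.1 p.2 diar_stride)).sum := by
      simp only [pvLength_pyRange]
    rw [this]
    exact hpre.2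
  simp only [get_timestamps, get_timestamps_alt]
  rw [← List.foldl_flatMap]
  rw [show PySem.List.dedup diar_res = (PySem.Dict.counter diar_res).keys by
    rw [PySem.Dict.keys_counter, PySem.List.dedup_eq_ofList]]
  have h1 := pvStepA_zip diar_res
    (vad_ts.flatMap (fun p => PySem.List.pyRange p.1 p.2 diar_stride)) 0
    ((PySem.Dict.counter diar_res).keys.foldl (fun d x => d.insert x ([] : List Int)) PySem.Dict.empty)
    (by simpa using hlen)
  rw [show ((0 : Nat) : Int) = 0 by simp] at h1
  rw [h1]
  simp only [List.drop_zero]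
  apply List.map_congr_left
  intro q _
  rw [pvZipSlices, pvDelLoop_eq_collapse]
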